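-- pv_equiv track=rewrite | github.com/mexyusef/fmustools | fmuslang/schnell/app/stringutils.py | sort_and_remove_duplicates
-- ===== SOURCE A (Python) =====
-- def sort_and_remove_duplicates(input_string):
--   # Split the multiline string into a list of strings
--   lines = input_string.split('\n')
--
--   # Remove leading and trailing spaces from each line
--   lines = [line.strip() for line in lines]
--
--   # Remove any empty strings from the list
--   lines = [line for line in lines if line]
--
--   # Remove duplicate lines while preserving the order
--   unique_lines = list(dict.fromkeys(lines))
--
--   # Sort the list of unique strings
--   sorted_lines = sorted(unique_lines)
--
--   # Join the sorted unique strings back into a multiline string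
--   result_string = '\n'.join(sorted_lines)
--
--   return result_string
-- ===== SOURCE B (Python) =====
-- def sort_and_remove_duplicates(input_string):
--     # Collect stripped non-empty lines in one pass.
--     lines = []
--     for raw in input_string.split('\n'):
--         line = raw.strip()
--         if line != "":
--             lines.append(line)
--     # Sort first, then remove duplicates by a single adjacent-comparison scan:
--     # no hash container, dedup relies on sorted adjacency.
--     lines.sort()
--     result = []
--     prev = None
--     for line in lines:
--         if line != prev:
--             result.append(line)
--             prev = line
--     return '\n'.join(result)
-- ===== Notes on version B (the rewrite author's own statement) =====
-- stated objective: alternative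
-- what changed: B sorts the stripped non-empty lines first and removes duplicates with a single adjacent-comparison scan over the sorted list (tracking only the previously kept line), instead of A's hash-based dict.fromkeys dedup followed by sorting.
import Mathlib
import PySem

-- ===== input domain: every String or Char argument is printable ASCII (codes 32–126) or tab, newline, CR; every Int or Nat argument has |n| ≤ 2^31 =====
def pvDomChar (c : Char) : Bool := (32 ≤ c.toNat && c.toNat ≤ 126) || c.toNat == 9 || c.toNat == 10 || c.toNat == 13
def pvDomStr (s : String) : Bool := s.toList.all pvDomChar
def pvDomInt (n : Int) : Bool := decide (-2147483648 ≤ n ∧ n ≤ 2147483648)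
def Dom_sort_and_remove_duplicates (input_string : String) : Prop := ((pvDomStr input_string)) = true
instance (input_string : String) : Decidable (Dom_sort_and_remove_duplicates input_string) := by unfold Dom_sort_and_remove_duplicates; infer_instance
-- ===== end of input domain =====

-- B sorts the filtered lines first and deduplicates with one adjacent-comparison scan
-- (no hash container), instead of A's dict.fromkeys dedup followed by sorting; same cost class.

-- ===== PORT A =====
def sort_and_remove_duplicates (input_string : String) : String :=
  -- input_string.split('\n'): sep "\n" ≠ "", so split? is always `some` (getD never fires)
  let lines := (PySem.Str.split? input_string "\n").getD []
  let lines := lines.map PySem.Str.strip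
  let lines := lines.filter (fun line => line != "")   -- Python truthiness of str = non-empty
  let unique_lines := PySem.List.dedup lines           -- list(dict.fromkeys(lines))
  let sorted_lines := PySem.List.sorted unique_lines (fun x => x)
  PySem.Str.join "\n" sorted_lines

-- ===== PORT B =====
-- the body of Source B's second loop: keep `line` only when it differs from the last kept one
def pvKeepStep (st : List String × Option String) (line : String) : List String × Option String :=
  if some line = st.2 then st else (st.1 ++ [line], some line)

def sort_and_remove_duplicates_alt (input_string : String) : String :=
  -- first loop: collect stripped non-empty lines (split? is always `some`, sep ≠ "")
  let lines := ((PySem.Str.split? input_string "\n").getD []).foldl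
      (fun acc raw => let line := PySem.Str.strip raw; if line != "" then acc ++ [line] else acc) []
  -- lines.sort() on a local list (no caller-visible mutation)
  let lines := PySem.List.sorted lines (fun x => x)
  -- second loop: adjacent-comparison dedup with `prev`
  let result := (lines.foldl pvKeepStep ([], none)).1
  PySem.Str.join "\n" result

-- ===== PRECONDITION & SPEC =====
def Spec_sort_and_remove_duplicates (input_string : String) (out : String) : Prop := out = sort_and_remove_duplicates_alt input_string
instance (input_string : String) (out : String) : Decidable (Spec_sort_and_remove_duplicates input_string out) := by unfold Spec_sort_and_remove_duplicates; infer_instance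

-- ===== CLAIM (what is proved, stated in full; the proofs are below) =====
def Claim_equal_sort_and_remove_duplicates : Prop := ∀ (input_string : String), Dom_sort_and_remove_duplicates input_string → Spec_sort_and_remove_duplicates input_string (sort_and_remove_duplicates input_string)

-- ===== LEMMAS AND PROOFS =====

-- proof-side recursive form of B's second loop: dedup `ys` given the previously kept line `p`
def pvAdjDedup (p : Option String) : List String → List String
  | [] => []
  | y :: t => if some y = p then pvAdjDedup p t else y :: pvAdjDedup (some y) t

lemma pvKeep_foldl (ys : List String) : ∀ (acc : List String) (p : Option String),
    (ys.foldl pvKeepStep (acc, p)).1 = acc ++ pvAdjDedup p ys := by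
  induction ys with
  | nil => simp [pvAdjDedup]
  | cons y t ih =>
    intro acc p
    simp only [List.foldl, pvAdjDedup, pvKeepStep]
    by_cases h : some y = p
    · rw [if_pos h, if_pos h, ih]
    · rw [if_neg h, if_neg h, ih]
      simp

lemma pvAdjDedup_subset (ys : List String) : ∀ (p : Option String) (x : String),
    x ∈ pvAdjDedup p ys → x ∈ ys := by
  induction ys with
  | nil => simp [pvAdjDedup]
  | cons y t ih =>
    intro p x hx
    by_cases h : some y = p
    · simp only [pvAdjDedup, if_pos h] at hx
      exact List.mem_cons_of_mem _ (ih p x hx)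
    · simp only [pvAdjDedup, if_neg h, List.mem_cons] at hx
      rcases hx with rfl | hx
      · exact List.mem_cons_self
      · exact List.mem_cons_of_mem _ (ih (some y) x hx)

lemma pvAdjDedup_mem_of_mem (ys : List String) : ∀ (p : Option String) (x : String),
    x ∈ ys → x ∈ pvAdjDedup p ys ∨ some x = p := by
  induction ys with
  | nil => simp
  | cons y t ih =>
    intro p x hx
    by_cases h : some y = p
    · simp only [pvAdjDedup, if_pos h]
      rcases List.mem_cons.1 hx with rfl | hx
      · right; exact h
      · rcases ih p x hx with h1 | h1
        · left; exact h1
        · right; exact h1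
    · simp only [pvAdjDedup, if_neg h]
      rcases List.mem_cons.1 hx with rfl | hx
      · left; exact List.mem_cons_self
      · rcases ih (some y) x hx with h1 | h1
        · left; exact List.mem_cons_of_mem _ h1
        · left; rw [Option.some_inj.1 h1]; exact List.mem_cons_self
  
lemma pvAdjDedup_pairwise (ys : List String) : ∀ (p : Option String),
    ys.Pairwise (· ≤ ·) → (∀ v ∈ p, ∀ y ∈ ys, v ≤ y) →
    (pvAdjDedup p ys).Pairwise (· < ·) ∧ (∀ x ∈ pvAdjDedup p ys, ∀ v ∈ p, v < x) := by
  induction ys with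
  | nil => intro p _ _; simp [pvAdjDedup]
  | cons y t ih =>
    intro p hpw hlb
    obtain ⟨hy, ht⟩ := List.pairwise_cons.1 hpw
    by_cases h : some y = p
    · simp only [pvAdjDedup, if_pos h]
      have := ih p ht (by intro v hv z hz; subst h; cases hv; exact hy z hz)
      exact this
    · simp only [pvAdjDedup, if_neg h]
      obtain ⟨hp1, hp2⟩ := ih (some y) ht (by intro v hv z hz; cases hv; exact hy z hz)
      constructor
      · exact List.pairwise_cons.2 ⟨fun z hz => hp2 z hz y rfl, hp1⟩
      · intro x hx v hv
        have hv' : p = some v := Option.mem_def.1 hv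
        have hvy : v < y := by
          refine lt_of_le_of_ne (hlb v hv y List.mem_cons_self) (fun he => h ?_)
          rw [hv', he]
        rcases List.mem_cons.1 hx with rfl | hx
        · exact hvy
        · exact lt_trans hvy (hp2 x hx y rfl)

lemma pvAdjDedup_nodup (ys : List String) (h : ys.Pairwise (· ≤ ·)) :
    (pvAdjDedup none ys).Nodup :=
  ((pvAdjDedup_pairwise ys none h (by simp)).1).imp ne_of_lt

-- B's first loop builds exactly A's map-then-filter list
lemma pvBuild_foldl (raws : List String) : ∀ (acc : List String),
    raws.foldl (fun acc raw => let line := PySem.Str.strip raw;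
        if line != "" then acc ++ [line] else acc) acc
      = acc ++ ((raws.map PySem.Str.strip).filter (fun line => line != "")) := by
  induction raws with
  | nil => simp
  | cons r t ih =>
    intro acc
    rw [List.foldl_cons, List.map_cons, List.filter_cons]
    show List.foldl _ (if (PySem.Str.strip r != "") = true
        then acc ++ [PySem.Str.strip r] else acc) t = _
    by_cases h : (PySem.Str.strip r != "") = true
    · rw [if_pos h, if_pos h, ih]
      simp
    · rw [if_neg h, if_neg h, ih]

-- the core: sorting A's dedup equals adjacent-dedup of B's sorted list
lemma pvCore (xs : List String) :
    PySem.List.sorted (PySem.List.dedup xs) (fun x => x)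
      = pvAdjDedup none (PySem.List.sorted xs (fun x => x)) := by
  apply PySem.List.sorted_eq_of_perm_of_pairwise_lt
  · refine (List.perm_ext_iff_of_nodup
      (pvAdjDedup_nodup _ (PySem.List.sorted_pairwise xs (fun x => x)))
      (PySem.List.nodup_dedup xs)).2 ?_
    intro a
    constructor
    · intro ha
      have := pvAdjDedup_subset _ none a ha
      rw [PySem.List.mem_sorted] at this
      exact (PySem.List.mem_dedup xs a).2 this
    · intro ha
      have : a ∈ PySem.List.sorted xs (fun x => x) := by
        rw [PySem.List.mem_sorted]; exact (PySem.List.mem_dedup xs a).1 ha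
      rcases pvAdjDedup_mem_of_mem _ none a this with h | h
      · exact h
      · cases h
  · exact (pvAdjDedup_pairwise _ none (PySem.List.sorted_pairwise xs (fun x => x)) (by simp)).1

-- ===== VERDICT (by name: the statement is the Claim_ definition above) =====
theorem sort_and_remove_duplicates_spec : Claim_equal_sort_and_remove_duplicates := by
  intro s _
  unfold Spec_sort_and_remove_duplicates sort_and_remove_duplicates sort_and_remove_duplicates_alt
  simp only [pvBuild_foldl, pvKeep_foldl, List.nil_append]
  rw [pvCore]
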